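-- pv_equiv track=rewrite | github.com/shikixyx/AtCoder | CodeChef/April Challenge/2.py | solve
-- ===== SOURCE A (Python) =====
-- def solve(N, A):
--     ones = [i for i, a in enumerate(A) if a == 1]
--     L = len(ones)
--
--     if L <= 1:
--         return 'YES'
--
--     ok = True
--     for i in range(1, L):
--         d = ones[i] - ones[i - 1]
--         if d < 6:
--             ok = False
--             break
--
--     if ok:
--         ret = 'YES'
--     else:
--         ret = 'NO'
--
--     return ret
-- ===== SOURCE B (Python) =====
-- def solve(N, A):
--     # Slide a bounded buffer of the last (up to) 6 values over A; the spacing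
--     # condition holds iff no length-6 window ever contains two 1s.
--     window = []
--     for a in A:
--         window.append(a)
--         if len(window) > 6:
--             window.pop(0)
--         if window.count(1) > 1:
--             return 'NO'
--     return 'YES'
-- ===== Notes on version B (the rewrite author's own statement) =====
-- stated objective: alternative
-- what changed: B never computes indices or gaps: it slides a bounded buffer of the last 6 values over A and answers NO as soon as some 6-window contains two 1s, whereas A collects the whole list of 1-indices and then scans consecutive differences.
import Mathlib
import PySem

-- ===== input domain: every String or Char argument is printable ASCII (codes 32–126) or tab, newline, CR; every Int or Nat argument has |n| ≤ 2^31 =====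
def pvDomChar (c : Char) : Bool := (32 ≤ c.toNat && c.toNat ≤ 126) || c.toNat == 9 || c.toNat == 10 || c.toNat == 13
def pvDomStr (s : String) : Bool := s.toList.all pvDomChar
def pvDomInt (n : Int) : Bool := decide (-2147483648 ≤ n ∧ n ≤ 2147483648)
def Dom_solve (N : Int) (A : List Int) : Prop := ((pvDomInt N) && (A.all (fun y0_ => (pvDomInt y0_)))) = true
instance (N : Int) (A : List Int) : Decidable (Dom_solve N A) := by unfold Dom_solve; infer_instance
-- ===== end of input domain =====

-- B replaces A's collect-all-1-indices-then-scan-gaps by sliding a bounded buffer of the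
-- last 6 values over A, answering NO as soon as a window contains two 1s (alternative, O(1) space).

-- ===== PORT A =====
-- the 'for i in range(1, L)' loop with ok/break, as the obvious structural recursion
-- carrying the previous element of `ones` (ones[i-1]) and the rest (ones[i:])
def solveScan : Int → List Int → Bool
  | _, [] => true
  | p, x :: xs => if x - p < 6 then false else solveScan x xs

def solve (N : Int) (A : List Int) : String :=
  let ones : List Int :=
    ((PySem.List.enumerate A).filter (fun p => p.2 == 1)).map (fun p => p.1)
  let L : Int := ones.length
  if L ≤ 1 then "YES"
  else
    let ok : Bool := match ones with
      | [] => true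
      | x :: xs => solveScan x xs
    if ok then "YES" else "NO"

-- ===== PORT B =====
-- window.append(a); if len > 6: pop(0); if window.count(1) > 1: return 'NO'
def winStep (w : List Int) (a : Int) : List Int :=
  if 6 < (w ++ [a]).length then (w ++ [a]).drop 1 else (w ++ [a])

def altLoop : List Int → List Int → String
  | _, [] => "YES"
  | w, a :: rest =>
    if 1 < (winStep w a).count 1 then "NO" else altLoop (winStep w a) rest

def solve_alt (N : Int) (A : List Int) : String :=
  altLoop [] A

-- ===== PRECONDITION & SPEC =====
def Spec_solve (N : Int) (A : List Int) (out : String) : Prop := out = solve_alt N A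
instance (N : Int) (A : List Int) (out : String) : Decidable (Spec_solve N A out) := by unfold Spec_solve; infer_instance

-- ===== CLAIM (what is proved, stated in full; the proofs are below) =====
def Claim_equal_solve : Prop := ∀ (N : Int) (A : List Int), Dom_solve N A → Spec_solve N A (solve N A)

-- ===== LEMMAS AND PROOFS =====

-- reference: "distance since the last 1", capped at 6 (6 also meaning "no previous 1")
def ref : Int → List Int → Bool
  | _, [] => true
  | s, a :: rest => if a = 1 then (if s < 6 then false else ref 1 rest) else ref (min (s + 1) 6) rest

-- the 1-indices of A starting at offset k, as a direct recursion
def onesFrom : Int → List Int → List Int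
  | _, [] => []
  | k, a :: rest => if a == 1 then k :: onesFrom (k + 1) rest else onesFrom (k + 1) rest

lemma onesFrom_eq_filter (A : List Int) : ∀ (k : Int),
    ((PySem.List.enumerate A k).filter (fun p => p.2 == 1)).map (fun p => p.1) = onesFrom k A := by
  induction A with
  | nil => intro k; simp [PySem.List.enumerate_nil, onesFrom]
  | cons a rest ih =>
    intro k
    simp only [PySem.List.enumerate_cons, List.filter_cons, onesFrom]
    by_cases h : a == 1 <;> simp [h, ih]

lemma scan_eq_ref (A : List Int) : ∀ (k p : Int), p < k →
    solveScan p (onesFrom k A) = ref (min (k - p) 6) A := by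
  induction A with
  | nil => intro k p _; simp [onesFrom, solveScan, ref]
  | cons a rest ih =>
    intro k p hpk
    by_cases h : a = 1
    · simp only [onesFrom, h, beq_self_eq_true, if_true, solveScan, ref, if_true]
      by_cases hd : k - p < 6
      · simp [hd, show min (k - p) 6 < 6 by omega]
      · rw [if_neg hd, if_neg (show ¬ min (k - p) 6 < 6 by omega)]
        rw [ih (k + 1) k (by omega)]
        norm_num
    · have hb : (a == 1) = false := by simp [h]
      rw [show onesFrom k (a :: rest) = onesFrom (k + 1) rest from by simp [onesFrom, hb]]
      rw [ih (k + 1) p (by omega)]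
      simp only [ref, if_neg h]
      congr 1
      omega

lemma ones_match_eq_ref (A : List Int) : ∀ (k : Int),
    (match onesFrom k A with | [] => true | x :: xs => solveScan x xs) = ref 6 A := by
  induction A with
  | nil => intro k; simp [onesFrom, ref]
  | cons a rest ih =>
    intro k
    by_cases h : a = 1
    · simp only [onesFrom, h, beq_self_eq_true, if_true, ref]
      rw [scan_eq_ref rest (k + 1) k (by omega)]
      norm_num
    · have hb : (a == 1) = false := by simp [h]
      rw [show onesFrom k (a :: rest) = onesFrom (k + 1) rest from by simp [onesFrom, hb]]
      rw [ih (k + 1)]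
      simp only [ref, if_neg h]
      norm_num

-- A equals the reference
lemma solve_eq_ref (N : Int) (A : List Int) :
    solve N A = (if ref 6 A then "YES" else "NO") := by
  unfold solve
  rw [show (PySem.List.enumerate A) = PySem.List.enumerate A 0 from rfl, onesFrom_eq_filter]
  rw [← ones_match_eq_ref A 0]
  cases h : onesFrom 0 A with
  | nil => simp
  | cons x xs =>
    cases xs with
    | nil => simp [solveScan]
    | cons y ys => simp

-- B's window-state invariant: either the window has no 1 and s = 6 (no recent 1),
-- or the window splits around its unique 1 with s = (trailing part length) + 1
lemma altLoop_eq_ref (rest : List Int) : ∀ (w : List Int) (s : Int),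
    w.length ≤ 6 →
    ((1 ∉ w ∧ s = 6) ∨ ∃ u v, w = u ++ 1 :: v ∧ 1 ∉ u ∧ 1 ∉ v ∧ s = (v.length : Int) + 1) →
    altLoop w rest = (if ref s rest then "YES" else "NO") := by
  induction rest with
  | nil => intro w s _ _; simp [altLoop, ref]
  | cons a rest ih =>
    intro w s hlen hrel
    simp only [altLoop]
    rcases hrel with ⟨hmem, hs⟩ | ⟨u, v, hw, hu, hv, hs⟩
    · subst hs
      have hcnt0 : w.count 1 = 0 := List.count_eq_zero.mpr hmem
      by_cases ha : a = 1
      · subst ha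
        have hcnt : (winStep w 1).count 1 ≤ 1 := by
          unfold winStep
          split
          · calc ((w ++ [1]).drop 1).count 1 ≤ (w ++ [1]).count 1 :=
                  (List.drop_sublist 1 (w ++ [1])).count_le 1
              _ = 1 := by simp [hcnt0]
          · simp [hcnt0]
        have href : ref 6 (1 :: rest) = ref 1 rest := by
          simp [ref]
        rw [if_neg (by omega)]
        simp only [href]
        apply ih
        · unfold winStep; split <;> simp_all
        · right
          unfold winStep
          by_cases h6 : w.length = 6
          · cases w with
            | nil => simp at h6
            | cons b w0 =>
              have h5 : w0.length = 5 := by have := h6; simp at this; omega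
              refine ⟨w0, [], by simp [h5], ?_, by simp, by simp⟩
              intro hmem'; exact hmem (by simp [hmem'])
          · refine ⟨w, [], ?_, hmem, by simp, by simp⟩
            rw [if_neg (by simp; omega)]
      · have hcnt : (winStep w a).count 1 = 0 := by
          have h0 : (w ++ [a]).count 1 = 0 := by simp [hcnt0, ha]
          unfold winStep
          split
          · exact Nat.le_zero.mp (h0 ▸ (List.drop_sublist 1 (w ++ [a])).count_le 1)
          · exact h0
        have href : ref 6 (a :: rest) = ref 6 rest := by
          simp [ref, ha]
        rw [if_neg (by omega)]
        simp only [href]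
        apply ih
        · unfold winStep; split <;> simp_all
        · left
          refine ⟨?_, rfl⟩
          intro hmem'
          have := List.count_pos_iff.mpr hmem'
          omega
    · subst hw hs
      have hulen : u.length + 1 + v.length ≤ 6 := by have := hlen; simp at this; omega
      have hcu : u.count 1 = 0 := List.count_eq_zero.mpr hu
      have hcv : v.count 1 = 0 := List.count_eq_zero.mpr hv
      by_cases ha : a = 1
      · subst ha
        by_cases h6 : u.length + 1 + v.length = 6
        · cases u with
          | cons b u0 =>
            -- 1 survives the drop: two 1s in the window → NO on both sides
            have hcu0 : u0.count 1 = 0 :=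
              List.count_eq_zero.mpr (fun h => hu (List.mem_cons_of_mem _ h))
            have h6' : u0.length + v.length = 4 := by have := h6; simp at this; omega
            have hcnt : (winStep (b :: u0 ++ 1 :: v) 1).count 1 = 2 := by
              rw [show winStep (b :: u0 ++ 1 :: v) 1 = u0 ++ 1 :: v ++ [1] from by
                unfold winStep; rw [if_pos (by simp; omega)]; simp]
              simp [List.count_append, hcv, hcu0]
            have href : ref ((v.length : Int) + 1) (1 :: rest) = false := by
              simp [ref, show (v.length : Int) + 1 < 6 by omega]
            rw [if_pos (by omega)]
            simp [href]
          | nil =>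
            -- the old 1 at the head is popped: window keeps a single 1
            simp only [List.nil_append] at hlen ⊢
            have hv5 : v.length = 5 := by have := h6; simp at this; omega
            have hw' : winStep (1 :: v) 1 = v ++ [1] := by
              unfold winStep; rw [if_pos (by simp [hv5])]; rfl
            have hcnt : (winStep (1 :: v) 1).count 1 = 1 := by
              rw [hw']; simp [List.count_append, hcv]
            have href : ref ((v.length : Int) + 1) (1 :: rest) = ref 1 rest := by
              simp [ref, hv5]
            rw [if_neg (by omega)]
            simp only [href]
            apply ih
            · rw [hw']; simp [hv5]
            · right; exact ⟨v, [], by simp [hw'], hv, by simp, by simp⟩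
        · -- no pop: both 1s stay → NO; and s = v.length + 1 < 6
          have hcnt : (winStep (u ++ 1 :: v) 1).count 1 = 2 := by
            rw [show winStep (u ++ 1 :: v) 1 = u ++ 1 :: v ++ [1] from by
              unfold winStep; rw [if_neg (by simp; omega)]]
            simp [List.count_append, hcu, hcv]
          have href : ref ((v.length : Int) + 1) (1 :: rest) = false := by
            simp [ref, show (v.length : Int) + 1 < 6 by omega]
          rw [if_pos (by omega)]
          simp [href]
      · by_cases h6 : u.length + 1 + v.length = 6
        · cases u with
          | cons b u0 =>
            have hcu0 : u0.count 1 = 0 :=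
              List.count_eq_zero.mpr (fun h => hu (List.mem_cons_of_mem _ h))
            have h6' : u0.length + v.length = 4 := by have := h6; simp at this; omega
            have hw' : winStep (b :: u0 ++ 1 :: v) a = u0 ++ 1 :: v ++ [a] := by
              unfold winStep; rw [if_pos (by simp; omega)]; simp
            have hcnt : (winStep (b :: u0 ++ 1 :: v) a).count 1 = 1 := by
              rw [hw']
              simp [List.count_append, hcv, ha, hcu0]
            have href : ref ((v.length : Int) + 1) (a :: rest) = ref ((v.length : Int) + 2) rest := by
              simp [ref, ha, show min ((v.length : Int) + 1 + 1) 6 = (v.length : Int) + 2 by omega]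
            rw [if_neg (by omega)]
            simp only [href]
            apply ih
            · rw [hw']; simp; omega
            · right
              refine ⟨u0, v ++ [a], by rw [hw']; simp, fun h => hu (List.mem_cons_of_mem _ h), ?_, by simp; omega⟩
              intro h; rcases List.mem_append.mp h with h | h
              · exact hv h
              · simp at h; exact ha h.symm
          | nil =>
            -- the lone 1 at the head is popped: window now 1-free, s caps at 6
            simp only [List.nil_append] at hlen ⊢
            have hv5 : v.length = 5 := by have := h6; simp at this; omega
            have hw' : winStep (1 :: v) a = v ++ [a] := by
              unfold winStep; rw [if_pos (by simp [hv5])]; rfl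
            have hcnt : (winStep (1 :: v) a).count 1 = 0 := by
              rw [hw']; simp [List.count_append, hcv, ha]
            have href : ref ((v.length : Int) + 1) (a :: rest) = ref 6 rest := by
              simp [ref, ha, show min ((v.length : Int) + 1 + 1) 6 = 6 by rw [hv5]; norm_num]
            rw [if_neg (by omega)]
            simp only [href]
            apply ih
            · rw [hw']; simp [hv5]
            · left
              refine ⟨?_, rfl⟩
              rw [hw']
              intro h; rcases List.mem_append.mp h with h | h
              · exact hv h
              · simp at h; exact ha h.symm
        · have hw' : winStep (u ++ 1 :: v) a = u ++ 1 :: v ++ [a] := by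
            unfold winStep; rw [if_neg (by simp; omega)]
          have hcnt : (winStep (u ++ 1 :: v) a).count 1 = 1 := by
            rw [hw']; simp [List.count_append, List.count_cons, hcu, hcv, ha]
          have href : ref ((v.length : Int) + 1) (a :: rest) = ref ((v.length : Int) + 2) rest := by
            simp [ref, ha, show min ((v.length : Int) + 1 + 1) 6 = (v.length : Int) + 2 by omega]
          rw [if_neg (by omega)]
          simp only [href]
          apply ih
          · rw [hw']; simp; omega
          · right
            refine ⟨u, v ++ [a], by simp [hw'], hu, ?_, by simp; omega⟩
            intro h; rcases List.mem_append.mp h with h | h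
            · exact hv h
            · simp at h; exact ha h.symm

-- ===== VERDICT (by name: the statement is the Claim_ definition above) =====
theorem solve_spec : Claim_equal_solve := by
  intro N A _
  show solve N A = solve_alt N A
  rw [solve_eq_ref, solve_alt, altLoop_eq_ref A [] 6 (by simp) (Or.inl ⟨by simp, rfl⟩)]
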